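-- pv_equiv track=rewrite | github.com/Ahuge/PyLeague | examples/solutions/challenge_1/solution_walk.py | frames
-- ===== SOURCE A (Python) =====
-- def frames(s):
--     def x(i):
--         try: return s[i]
--         except: return ""
--     i = -1
--     while x(i):
--         if x(i) == "]" and x(i-1).isdigit():
--             j = i-1
--             while x(j-1).isdigit(): j -= 1
--             if x(j-1) == "-" and x(j-2).isdigit():
--                 k = j-1
--                 while x(k-1).isdigit(): k -= 1
--                 if x(k-1) == "[":
--                     return int(s[j:i])-int(s[k:j-1])+1
--         i -= 1
--     return 0
-- ===== SOURCE B (Python) =====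
-- def _frames_value_at(s, i):
--     """If a complete [digits-digits] pattern opens at s[i] == '[', return its
--     value b - a + 1, else None."""
--     n = len(s)
--     j = i + 1
--     while j < n and s[j].isdigit():
--         j += 1
--     if j == i + 1 or j >= n or s[j] != '-':
--         return None
--     k = j + 1
--     while k < n and s[k].isdigit():
--         k += 1
--     if k == j + 1 or k >= n or s[k] != ']':
--         return None
--     return int(s[j + 1:k]) - int(s[i + 1:j]) + 1
--
--
-- def frames(s):
--     n = len(s)
--     ans = 0
--     i = 0
--     while i < n:
--         if s[i] == '[':
--             v = _frames_value_at(s, i)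
--             if v is not None:
--                 ans = v
--         i += 1
--     return ans
-- ===== Notes on version B (the rewrite author's own statement) =====
-- stated objective: alternative
-- what changed: A walks the string right-to-left with Python negative indices and an exception-swallowing accessor, anchoring on closing brackets and verifying each candidate number-range pattern backwards; B makes one left-to-right pass anchored on opening brackets, parsing each candidate pattern forwards and keeping the value of the last complete match.
import Mathlib
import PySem

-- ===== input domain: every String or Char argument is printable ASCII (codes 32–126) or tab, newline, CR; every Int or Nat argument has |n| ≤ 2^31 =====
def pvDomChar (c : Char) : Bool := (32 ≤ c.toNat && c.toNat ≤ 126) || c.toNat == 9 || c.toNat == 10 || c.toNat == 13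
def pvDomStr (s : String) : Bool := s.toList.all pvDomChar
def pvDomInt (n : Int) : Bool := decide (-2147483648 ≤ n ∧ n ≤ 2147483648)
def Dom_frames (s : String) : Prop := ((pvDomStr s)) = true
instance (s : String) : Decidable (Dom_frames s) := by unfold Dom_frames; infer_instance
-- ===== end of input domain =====

-- B replaces A's right-to-left negative-index walk (anchored on ']') by a single
-- left-to-right scan anchored on '[' that keeps the value of the last complete
-- "[digits-digits]" pattern; objective: alternative (a timing run measured B
-- constant-factor faster; both are quadratic in the worst case).

-- ===== PORT A =====
-- x(i) returns "" on IndexError; modelled as Option Char (none = "").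
def framesXDigit (l : List Char) (i : Int) : Bool :=
  match PySem.List.pyGet? l i with
  | some c => PySem.Chars.isdigit c
  | none => false          -- "".isdigit() is False

-- `while x(j-1).isdigit(): j -= 1`; fuel = len(s) is never exhausted (the scan
-- moves left through distinct in-range positions).
def framesScanL (l : List Char) : Nat → Int → Int
  | 0, j => j
  | fuel+1, j => if framesXDigit l (j-1) then framesScanL l fuel (j-1) else j

-- int(s[a:b]); on A's success path the slice is a nonempty digit run, so
-- int() cannot raise; the .getD 0 is only a totalizer for the dead branch.
def framesIntAt (l : List Char) (a b : Int) : Int :=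
  (PySem.Int.ofChars? (PySem.List.slice l (some a) (some b))).getD 0

-- the outer `while x(i): ... i -= 1`; fuel = len(s)+1 is never exhausted
-- (x(i) = "" at i = -len(s)-1 at the latest).
def framesLoop (l : List Char) : Nat → Int → Int
  | 0, _ => 0
  | fuel+1, i =>
    match PySem.List.pyGet? l i with
    | none => 0
    | some c =>
      if c = ']' ∧ framesXDigit l (i-1) = true then
        let j := framesScanL l l.length (i-1)
        if PySem.List.pyGet? l (j-1) = some '-' ∧ framesXDigit l (j-2) = true then
          let k := framesScanL l l.length (j-1)
          if PySem.List.pyGet? l (k-1) = some '[' then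
            framesIntAt l j i - framesIntAt l k (j-1) + 1
          else framesLoop l fuel (i-1)
        else framesLoop l fuel (i-1)
      else framesLoop l fuel (i-1)

def frames (s : String) : Int :=
  framesLoop s.toList (s.toList.length + 1) (-1)

-- ===== PORT B =====
-- `while j < n and s[j].isdigit(): j += 1`
def framesAltScan (l : List Char) (j : Nat) : Nat :=
  if h : j < l.length then
    if PySem.Chars.isdigit l[j] then framesAltScan l (j+1) else j
  else j
termination_by l.length - j

-- _frames_value_at(s, i); `j >= n or s[j] != '-'` is `l[j]? ≠ some '-'`;
-- the nonneg slices s[j+1:k] / s[i+1:j] are drop/take (PySem.List.slice_natCast);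
-- .getD 0 only totalizes int() on the unreachable non-digit case.
def framesAltValueAt (l : List Char) (i : Nat) : Option Int :=
  let j := framesAltScan l (i+1)
  if j = i + 1 ∨ l[j]? ≠ some '-' then none
  else
    let k := framesAltScan l (j+1)
    if k = j + 1 ∨ l[k]? ≠ some ']' then none
    else some ((PySem.Int.ofChars? ((l.drop (j+1)).take (k-(j+1)))).getD 0
             - (PySem.Int.ofChars? ((l.drop (i+1)).take (j-(i+1)))).getD 0 + 1)

-- `i = 0; while i < n: ...; i += 1` keeping the last match's value in ans
def framesAltGo (l : List Char) (i : Nat) (ans : Int) : Int :=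
  if h : i < l.length then
    framesAltGo l (i+1)
      (if l[i] = '[' then
        match framesAltValueAt l i with
        | some v => v
        | none => ans
       else ans)
  else ans
termination_by l.length - i

def frames_alt (s : String) : Int := framesAltGo s.toList 0 0

-- ===== PRECONDITION & SPEC =====
def Spec_frames (s : String) (out : Int) : Prop := out = frames_alt s
instance (s : String) (out : Int) : Decidable (Spec_frames s out) := by unfold Spec_frames; infer_instance

-- ===== CLAIM (what is proved, stated in full; the proofs are below) =====
def Claim_equal_frames : Prop := ∀ (s : String), Dom_frames s → Spec_frames s (frames s)

-- ===== LEMMAS AND PROOFS =====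

-- a digit character at position x
def DigAt (l : List Char) (x : Nat) : Prop :=
  ∃ c, l[x]? = some c ∧ PySem.Chars.isdigit c = true

def DigitsAt (l : List Char) (a d : Nat) : Prop := ∀ t, t < d → DigAt l (a + t)

-- "[d1 digits]-[d2 digits]]" pattern whose '[' sits at p
def Tail (l : List Char) (p d1 d2 : Nat) : Prop :=
  1 ≤ d1 ∧ 1 ≤ d2 ∧ DigitsAt l (p+1) d1 ∧ l[p+1+d1]? = some '-' ∧
  DigitsAt l (p+2+d1) d2 ∧ l[p+2+d1+d2]? = some ']'

def Occ (l : List Char) (p d1 d2 : Nat) : Prop := l[p]? = some '[' ∧ Tail l p d1 d2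

def occVal (l : List Char) (p d1 d2 : Nat) : Int :=
  (PySem.Int.ofChars? ((l.drop (p+2+d1)).take d2)).getD 0
  - (PySem.Int.ofChars? ((l.drop (p+1)).take d1)).getD 0 + 1

def EndsAt (l : List Char) (q : Nat) : Prop :=
  ∃ p d1 d2, Occ l p d1 d2 ∧ p+2+d1+d2 = q

-- index bridges
lemma pyGet_shift (l : List Char) (q : Nat) (hq : q < l.length) :
    PySem.List.pyGet? l ((q:Int) - l.length) = some l[q] := by
  have he : ((q:Int) - l.length) = -((l.length - q : Nat) : Int) := by omega
  rw [he, PySem.List.pyGet?_neg_natCast l (l.length - q) (by omega) (by omega)]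
  have h2 : l.length - (l.length - q) = q := by omega
  rw [h2, List.getElem?_eq_getElem hq]

lemma pyGet_oob (l : List Char) (z : Int) (h : z < -(l.length:Int)) :
    PySem.List.pyGet? l z = none := by
  rw [PySem.List.pyGet?_eq_none_iff]
  simp [PySem.Raise.InRange]; omega

lemma slice_shift (l : List Char) (a b : Nat) (ha : a < l.length) (hb : b < l.length) :
    PySem.List.slice l (some ((a:Int) - l.length)) (some ((b:Int) - l.length))
      = (l.drop a).take (b - a) := by
  have e1 : ((a:Int) - l.length) = -((l.length - a : Nat) : Int) := by omega
  have e2 : ((b:Int) - l.length) = -((l.length - b : Nat) : Int) := by omega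
  rw [e1, e2]
  simp only [PySem.List.slice, PySem.List.clampIdx_neg_natCast _ _ (by omega : 0 < l.length - a),
    PySem.List.clampIdx_neg_natCast _ _ (by omega : 0 < l.length - b)]
  have h1 : l.length - (l.length - a) = a := by omega
  have h2 : l.length - (l.length - b) = b := by omega
  rw [h1, h2]

-- forward digit scan characterization
lemma scanR_char (l : List Char) (a : Nat) :
    ∃ e, framesAltScan l a = a + e ∧ DigitsAt l a e ∧
      (∀ c, l[a+e]? = some c → PySem.Chars.isdigit c = false) := by
  suffices h : ∀ (k a : Nat), l.length - a ≤ k → ∃ e, framesAltScan l a = a + e ∧ DigitsAt l a e ∧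
      (∀ c, l[a+e]? = some c → PySem.Chars.isdigit c = false) by
    exact h (l.length - a) a le_rfl
  intro k
  induction k with
  | zero =>
    intro a hk
    refine ⟨0, ?_, fun t ht => absurd ht (by omega), fun c hc => ?_⟩
    · rw [framesAltScan]; simp [show ¬ a < l.length from by omega]
    · rw [List.getElem?_eq_none (by omega)] at hc; cases hc
  | succ k ih =>
    intro a hk
    by_cases ha : a < l.length
    · by_cases hd : PySem.Chars.isdigit l[a] = true
      · obtain ⟨e, he, hdig, hbnd⟩ := ih (a+1) (by omega)
        refine ⟨e + 1, ?_, ?_, ?_⟩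
        · rw [framesAltScan]; simp [ha, hd, he]; omega
        · intro t ht
          rcases Nat.eq_zero_or_pos t with h0 | h0
          · exact ⟨l[a], by rw [h0, Nat.add_zero, List.getElem?_eq_getElem ha], hd⟩
          · obtain ⟨c, hc, hdc⟩ := hdig (t-1) (by omega)
            exact ⟨c, by rw [show a + t = a + 1 + (t-1) from by omega]; exact hc, hdc⟩
        · intro c hc
          exact hbnd c (by rw [show a + 1 + e = a + (e+1) from by omega]; exact hc)
      · refine ⟨0, ?_, fun t ht => absurd ht (by omega), fun c hc => ?_⟩
        · rw [framesAltScan]; simp [ha, hd]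
        · rw [Nat.add_zero, List.getElem?_eq_getElem ha] at hc
          cases hc; simpa using hd
    · refine ⟨0, ?_, fun t ht => absurd ht (by omega), fun c hc => ?_⟩
      · rw [framesAltScan]; simp [ha]
      · rw [List.getElem?_eq_none (by omega)] at hc; cases hc

-- backward digit scan characterization
lemma scanL_char (l : List Char) : ∀ (fuel b : Nat), b ≤ fuel → b ≤ l.length →
    ∃ a, a ≤ b ∧ framesScanL l fuel ((b:Int) - l.length) = (a:Int) - l.length ∧
      DigitsAt l a (b - a) ∧
      (a = 0 ∨ ∀ c, l[a-1]? = some c → PySem.Chars.isdigit c = false) := by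
  intro fuel
  induction fuel with
  | zero =>
    intro b hb hbn
    refine ⟨b, le_rfl, rfl, fun t ht => absurd ht (by omega), ?_⟩
    interval_cases b
    · exact Or.inl rfl
  | succ fuel ih =>
    intro b hb hbn
    rcases Nat.eq_zero_or_pos b with h0 | h0
    · subst h0
      refine ⟨0, le_rfl, ?_, fun t ht => absurd ht (by omega), Or.inl rfl⟩
      rw [framesScanL]
      have hx : framesXDigit l ((0:Nat) - (l.length:Int) - 1) = false := by
        unfold framesXDigit
        rw [pyGet_oob l _ (by omega)]
      rw [hx]
      simp
    · have hb1 : b - 1 < l.length := by omega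
      have hcast : (b:Int) - l.length - 1 = ((b-1 : Nat):Int) - l.length := by omega
      by_cases hd : PySem.Chars.isdigit l[b-1] = true
      · obtain ⟨a, ha, heq, hdig, hbnd⟩ := ih (b-1) (by omega) (by omega)
        refine ⟨a, by omega, ?_, ?_, hbnd⟩
        · rw [framesScanL]
          have hx : framesXDigit l ((b:Int) - l.length - 1) = true := by
            unfold framesXDigit
            rw [hcast, pyGet_shift l (b-1) hb1]
            exact hd
          rw [hx]
          simp only [if_true]
          rw [hcast, heq]
        · intro t ht
          rcases Nat.lt_or_ge t (b - 1 - a) with h1 | h1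
          · exact hdig t h1
          · have hab : a + t = b - 1 := by omega
            exact ⟨l[b-1], by rw [hab, List.getElem?_eq_getElem hb1], hd⟩
      · refine ⟨b, le_rfl, ?_, fun t ht => absurd ht (by omega), Or.inr ?_⟩
        · rw [framesScanL]
          have hx : framesXDigit l ((b:Int) - l.length - 1) = false := by
            unfold framesXDigit
            rw [hcast, pyGet_shift l (b-1) hb1]
            simpa using hd
          rw [hx]
          simp
        · intro c hc
          rw [List.getElem?_eq_getElem hb1] at hc
          cases hc; simpa using hd

-- a maximal digit run is pinned by any digit run with a non-digit left border
lemma pinL (l : List Char) (a a0 b : Nat) (h1 : a ≤ b) (h2 : a0 ≤ b) (ha0 : 1 ≤ a0)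
    (hdig : DigitsAt l a (b - a)) (hdig0 : DigitsAt l a0 (b - a0))
    (hb : a = 0 ∨ ∀ c, l[a-1]? = some c → PySem.Chars.isdigit c = false)
    (hb0 : ∃ c, l[a0-1]? = some c ∧ PySem.Chars.isdigit c = false) : a = a0 := by
  rcases Nat.lt_trichotomy a a0 with hlt | heq | hgt
  · exfalso
    obtain ⟨c0, hc0, hnc0⟩ := hb0
    have hd := hdig (a0 - 1 - a) (by omega)
    obtain ⟨c, hc, hdc⟩ := hd
    rw [show a + (a0 - 1 - a) = a0 - 1 from by omega, hc0] at hc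
    cases hc; rw [hdc] at hnc0; exact absurd hnc0 (by simp)
  · exact heq
  · exfalso
    rcases hb with h0 | hnb
    · omega
    · have hd := hdig0 (a - 1 - a0) (by omega)
      obtain ⟨c, hc, hdc⟩ := hd
      rw [show a0 + (a - 1 - a0) = a - 1 from by omega] at hc
      have := hnb c hc
      rw [hdc] at this; exact absurd this (by simp)

lemma pinF (l : List Char) (a e d : Nat)
    (hdig : DigitsAt l a e) (hbnd : ∀ c, l[a+e]? = some c → PySem.Chars.isdigit c = false)
    (hdig0 : DigitsAt l a d) (hbnd0 : ∃ c, l[a+d]? = some c ∧ PySem.Chars.isdigit c = false) :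
    e = d := by
  rcases Nat.lt_trichotomy e d with hlt | heq | hgt
  · exfalso
    obtain ⟨c, hc, hdc⟩ := hdig0 e hlt
    have := hbnd c hc
    rw [hdc] at this; exact absurd this (by simp)
  · exact heq
  · exfalso
    obtain ⟨c0, hc0, hnc0⟩ := hbnd0
    obtain ⟨c, hc, hdc⟩ := hdig d hgt
    rw [hc0] at hc
    cases hc; rw [hdc] at hnc0; exact absurd hnc0 (by simp)

-- B's helper on a pattern
lemma valueAt_some (l : List Char) (p d1 d2 : Nat) (hT : Tail l p d1 d2) :
    framesAltValueAt l p = some (occVal l p d1 d2) := by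
  obtain ⟨hd1, hd2, hdig1, hdash, hdig2, hket⟩ := hT
  obtain ⟨e, he, hdig, hbnd⟩ := scanR_char l (p+1)
  have he1 : e = d1 := pinF l (p+1) e d1 hdig hbnd hdig1 ⟨'-', by rw [← hdash], by simp [PySem.Chars.isdigit]⟩
  subst he1
  obtain ⟨e2, he2, hdig', hbnd'⟩ := scanR_char l (p+1+e+1)
  have hsh : p+1+e+1 = p+2+e := by omega
  rw [hsh] at he2 hdig' hbnd'
  have he2' : e2 = d2 := pinF l (p+2+e) e2 d2 hdig' hbnd'
    (by intro t ht; exact hdig2 t ht)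
    ⟨']', by rw [show p+2+e+d2 = p+2+e+d2 from rfl, ← hket], by simp [PySem.Chars.isdigit]⟩
  subst he2'
  simp only [framesAltValueAt, he]
  rw [if_neg (by
    rintro (hc | hc)
    · omega
    · exact hc (by rw [show p+1+e = p+1+e from rfl]; exact hdash))]
  rw [hsh, he2]
  rw [if_neg (by
    rintro (hc | hc)
    · omega
    · exact hc (by rw [show p+2+e+e2 = p+2+e+e2 from rfl]; exact hket))]
  have ha1 : p + 2 + e + e2 - (p + 2 + e) = e2 := by omega
  have ha2 : p + 1 + e - (p + 1) = e := by omega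
  rw [ha1, ha2]
  rfl

lemma valueAt_inv (l : List Char) (i : Nat) (v : Int)
    (h : framesAltValueAt l i = some v) :
    ∃ d1 d2, Tail l i d1 d2 ∧ v = occVal l i d1 d2 := by
  obtain ⟨e, he, hdig, hbnd⟩ := scanR_char l (i+1)
  simp only [framesAltValueAt, he] at h
  by_cases hc1 : i + 1 + e = i + 1 ∨ l[i+1+e]? ≠ some '-'
  · rw [if_pos hc1] at h; cases h
  · rw [if_neg hc1] at h
    rw [not_or, not_ne_iff] at hc1
    obtain ⟨hne1, hdash⟩ := hc1
    obtain ⟨e2, he2, hdig', hbnd'⟩ := scanR_char l (i+1+e+1)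
    rw [he2] at h
    by_cases hc2 : i + 1 + e + 1 + e2 = i + 1 + e + 1 ∨ l[i+1+e+1+e2]? ≠ some ']'
    · rw [if_pos hc2] at h; cases h
    · rw [if_neg hc2] at h
      rw [not_or, not_ne_iff] at hc2
      obtain ⟨hne2, hket⟩ := hc2
      refine ⟨e, e2, ⟨by omega, by omega, hdig, ?_, ?_, ?_⟩, ?_⟩
      · rw [show i+1+e = i+1+e from rfl]; exact hdash
      · intro t ht
        have := hdig' t ht
        rw [show i+1+e+1+t = i+2+e+t from by omega] at this
        exact this
      · rw [show i+2+e+e2 = i+1+e+1+e2 from by omega]; exact hket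
      · cases h
        have b1 : i+1+e+1+e2 - (i+1+e+1) = e2 := by omega
        have b2 : i+1+e - (i+1) = e := by omega
        have b3 : i+1+e+1 = i+2+e := by omega
        rw [b1, b2, b3]
        rfl

-- framesXDigit at an in-range / out-of-range shifted index
lemma xdigit_nat (l : List Char) (x : Nat) (hx : x < l.length) :
    framesXDigit l ((x:Int) - l.length) = PySem.Chars.isdigit l[x] := by
  unfold framesXDigit
  rw [pyGet_shift l x hx]

lemma xdigit_oob (l : List Char) (z : Int) (h : z < -(l.length:Int)) :
    framesXDigit l z = false := by
  unfold framesXDigit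
  rw [pyGet_oob l z h]

lemma digAt_elem (l : List Char) (x : Nat) (h : DigAt l x) :
    ∃ _ : x < l.length, PySem.Chars.isdigit l[x] = true := by
  obtain ⟨c, hc, hdc⟩ := h
  have hx := (List.getElem?_eq_some_iff.mp hc).1
  refine ⟨hx, ?_⟩
  rw [List.getElem?_eq_getElem hx] at hc
  cases hc
  exact hdc

-- A's loop: one step
lemma loopA_succ_none (l : List Char) (fuel : Nat) (q : Nat) (hq : q < l.length)
    (hno : ¬ EndsAt l q) :
    framesLoop l (fuel+1) ((q:Int) - l.length) = framesLoop l fuel ((q:Int) - l.length - 1) := by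
  rw [framesLoop, pyGet_shift l q hq]
  simp only []
  by_cases h1 : l[q] = ']' ∧ framesXDigit l ((q:Int) - ↑l.length - 1) = true
  · rw [if_pos h1]
    obtain ⟨hcq, hxd⟩ := h1
    have hq1 : 1 ≤ q := by
      by_contra h0
      rw [show (q:Int) - ↑l.length - 1 = -(l.length:Int) - 1 from by omega] at hxd
      rw [xdigit_oob l _ (by omega)] at hxd
      cases hxd
    have hdq : PySem.Chars.isdigit l[q-1] = true := by
      rw [show (q:Int) - ↑l.length - 1 = ((q-1:Nat):Int) - ↑l.length from by omega,
        xdigit_nat l (q-1) (by omega)] at hxd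
      exact hxd
    obtain ⟨a, ha, heq, hdg, hbnd⟩ := scanL_char l l.length (q-1) (by omega) (by omega)
    rw [show (q:Int) - ↑l.length - 1 = ((q-1:Nat):Int) - ↑l.length from by omega, heq]
    by_cases h2 : PySem.List.pyGet? l ((a:Int) - ↑l.length - 1) = some '-' ∧
        framesXDigit l ((a:Int) - ↑l.length - 2) = true
    · rw [if_pos h2]
      obtain ⟨hdash, hxd2⟩ := h2
      have ha1 : 1 ≤ a := by
        by_contra h0
        rw [show (a:Int) - ↑l.length - 1 = -(l.length:Int) - 1 from by omega,
          pyGet_oob l _ (by omega)] at hdash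
        cases hdash
      have hma : l[a-1]? = some '-' := by
        rw [show (a:Int) - ↑l.length - 1 = ((a-1:Nat):Int) - ↑l.length from by omega,
          pyGet_shift l (a-1) (by omega)] at hdash
        rw [List.getElem?_eq_getElem (by omega : a-1 < l.length)]
        exact hdash
      have ha2' : 2 ≤ a := by
        by_contra h0
        rw [show (a:Int) - ↑l.length - 2 = -(l.length:Int) + ((a:Int) - 2) from by omega] at hxd2
        rw [xdigit_oob l _ (by omega)] at hxd2
        cases hxd2
      have hda2 : PySem.Chars.isdigit l[a-2] = true := by
        rw [show (a:Int) - ↑l.length - 2 = ((a-2:Nat):Int) - ↑l.length from by omega,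
          xdigit_nat l (a-2) (by omega)] at hxd2
        exact hxd2
      obtain ⟨a2, ha2, heq2, hdg2, hbnd2⟩ := scanL_char l l.length (a-1) (by omega) (by omega)
      rw [show (a:Int) - ↑l.length - 1 = ((a-1:Nat):Int) - ↑l.length from by omega, heq2]
      by_cases h3 : PySem.List.pyGet? l ((a2:Int) - ↑l.length - 1) = some '['
      · exfalso
        have ha21 : 1 ≤ a2 := by
          by_contra h0
          rw [show (a2:Int) - ↑l.length - 1 = -(l.length:Int) - 1 from by omega,
            pyGet_oob l _ (by omega)] at h3
          cases h3
        have hbk : l[a2-1]? = some '[' := by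
          rw [show (a2:Int) - ↑l.length - 1 = ((a2-1:Nat):Int) - ↑l.length from by omega,
            pyGet_shift l (a2-1) (by omega)] at h3
          rw [List.getElem?_eq_getElem (by omega : a2-1 < l.length)]
          exact h3
        have hne : a2 ≤ a - 2 := by
          by_contra h0
          have he : a2 = a - 1 := by omega
          have : l[a-2] = '[' := by
            have := hbk
            rw [he, show a - 1 - 1 = a - 2 from by omega,
              List.getElem?_eq_getElem (by omega : a-2 < l.length)] at this
            exact Option.some_injective _ this
          rw [this] at hda2
          cases hda2
        apply hno
        refine ⟨a2 - 1, a - 1 - a2, q - a, ⟨?_, by omega, by omega, ?_, ?_, ?_, ?_⟩, by omega⟩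
        · exact hbk
        · intro t ht
          have := hdg2 t (by omega)
          rw [show a2 + t = a2 - 1 + 1 + t from by omega] at this
          exact this
        · rw [show a2 - 1 + 1 + (a - 1 - a2) = a - 1 from by omega]
          exact hma
        · intro t ht
          rcases Nat.lt_or_ge t (q - 1 - a) with h4 | h4
          · have := hdg t h4
            rw [show a + t = a2 - 1 + 2 + (a - 1 - a2) + t from by omega] at this
            exact this
          · refine ⟨l[q-1], ?_, hdq⟩
            rw [show a2 - 1 + 2 + (a - 1 - a2) + t = q - 1 from by omega,
              List.getElem?_eq_getElem (by omega : q-1 < l.length)]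
        · rw [show a2 - 1 + 2 + (a - 1 - a2) + (q - a) = q from by omega,
            List.getElem?_eq_getElem hq, hcq]
      · rw [if_neg h3]
    · rw [if_neg h2]
  · rw [if_neg h1]

lemma loopA_succ_some (l : List Char) (fuel : Nat) (p d1 d2 : Nat) (hO : Occ l p d1 d2) :
    framesLoop l (fuel+1) (((p+2+d1+d2 : Nat):Int) - l.length) = occVal l p d1 d2 := by
  obtain ⟨hb, hd1, hd2, hdig1, hdash, hdig2, hket⟩ := hO
  have hqn : p+2+d1+d2 < l.length := (List.getElem?_eq_some_iff.mp hket).1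
  have hcq : l[p+2+d1+d2] = ']' := by
    have h := hket
    rw [List.getElem?_eq_getElem hqn] at h
    exact Option.some_injective _ h
  rw [framesLoop, pyGet_shift l (p+2+d1+d2) hqn]
  simp only []
  have hxd : framesXDigit l ((↑(p+2+d1+d2) : Int) - ↑l.length - 1) = true := by
    rw [show ((p+2+d1+d2:Nat):Int) - ↑l.length - 1 = ((p+2+d1+(d2-1) : Nat):Int) - ↑l.length from by
      omega]
    rw [xdigit_nat l (p+2+d1+(d2-1)) (by omega)]
    obtain ⟨_, hd⟩ := digAt_elem l (p+2+d1+(d2-1)) (hdig2 (d2-1) (by omega))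
    exact hd
  rw [if_pos ⟨hcq, hxd⟩]
  have hidx1 : ((p+2+d1+d2:Nat):Int) - ↑l.length - 1 = ((p+2+d1+d2-1 : Nat):Int) - ↑l.length := by
    omega
  obtain ⟨a, ha, heq, hdg, hbnd⟩ := scanL_char l l.length (p+2+d1+d2-1) (by omega) (by omega)
  have hae : a = p+2+d1 := by
    refine pinL l a (p+2+d1) (p+2+d1+d2-1) ha (by omega) (by omega) hdg
      (fun t ht => by
        have := hdig2 t (by omega)
        exact this) hbnd ⟨'-', ?_, by decide⟩
    rw [show p+2+d1-1 = p+1+d1 from by omega]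
    exact hdash
  rw [hae] at heq
  rw [hidx1, heq]
  have hg2a : PySem.List.pyGet? l ((↑(p+2+d1):Int) - ↑l.length - 1) = some '-' := by
    rw [show ((p+2+d1:Nat):Int) - ↑l.length - 1 = ((p+1+d1 : Nat):Int) - ↑l.length from by
      omega]
    rw [pyGet_shift l (p+1+d1) (by omega)]
    have h := hdash
    rw [List.getElem?_eq_getElem (by omega : p+1+d1 < l.length)] at h
    rw [h]
  have hg2b : framesXDigit l ((↑(p+2+d1):Int) - ↑l.length - 2) = true := by
    rw [show ((p+2+d1:Nat):Int) - ↑l.length - 2 = ((p+1+(d1-1) : Nat):Int) - ↑l.length from by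
      omega]
    rw [xdigit_nat l (p+1+(d1-1)) (by omega)]
    obtain ⟨_, hd⟩ := digAt_elem l (p+1+(d1-1)) (hdig1 (d1-1) (by omega))
    exact hd
  rw [if_pos ⟨hg2a, hg2b⟩]
  have hidx2 : ((p+2+d1:Nat):Int) - ↑l.length - 1 = ((p+1+d1 : Nat):Int) - ↑l.length := by
    omega
  obtain ⟨a2, ha2, heq2, hdg2, hbnd2⟩ := scanL_char l l.length (p+1+d1) (by omega) (by omega)
  have hae2 : a2 = p+1 := by
    refine pinL l a2 (p+1) (p+1+d1) ha2 (by omega) (by omega) hdg2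
      (fun t ht => hdig1 t (by omega)) hbnd2 ⟨'[', ?_, by decide⟩
    rw [show p+1-1 = p from by omega]
    exact hb
  rw [hae2] at heq2
  rw [hidx2, heq2]
  have hg3 : PySem.List.pyGet? l ((↑(p+1):Int) - ↑l.length - 1) = some '[' := by
    rw [show ((p+1:Nat):Int) - ↑l.length - 1 = ((p : Nat):Int) - ↑l.length from by
      omega]
    rw [pyGet_shift l p (by omega)]
    have h := hb
    rw [List.getElem?_eq_getElem (by omega : p < l.length)] at h
    rw [h]
  rw [if_pos hg3]
  unfold framesIntAt
  rw [slice_shift l (p+2+d1) (p+2+d1+d2) (by omega) hqn]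
  rw [slice_shift l (p+1) (p+1+d1) (by omega) (by omega)]
  rw [show p+2+d1+d2 - (p+2+d1) = d2 from by omega, show p+1+d1 - (p+1) = d1 from by omega]
  rfl

-- A's loop: global characterization
lemma loopA_zero (l : List Char) : ∀ (m : Nat) (fuel : Nat), m ≤ l.length → m + 1 ≤ fuel →
    (∀ q, q < m → ¬ EndsAt l q) →
    framesLoop l fuel ((m:Int) - 1 - l.length) = 0 := by
  intro m
  induction m with
  | zero =>
    intro fuel hm hf hno
    rcases fuel with _ | f
    · omega
    · rw [framesLoop, pyGet_oob l _ (by omega)]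
  | succ m ih =>
    intro fuel hm hf hno
    rcases fuel with _ | f
    · omega
    · have hc : ((m+1 : Nat):Int) - 1 - l.length = (m:Int) - l.length := by omega
      rw [hc, loopA_succ_none l f m (by omega) (hno m (by omega))]
      have hc2 : (m:Int) - l.length - 1 = (m:Int) - 1 - l.length := by omega
      rw [hc2]
      exact ih f (by omega) (by omega) (fun q hq => hno q (by omega))

lemma loopA_find (l : List Char) (p d1 d2 : Nat) (hO : Occ l p d1 d2) :
    ∀ (m : Nat) (fuel : Nat), m ≤ l.length → m + 1 ≤ fuel → p+2+d1+d2 < m →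
    (∀ q', p+2+d1+d2 < q' → q' < m → ¬ EndsAt l q') →
    framesLoop l fuel ((m:Int) - 1 - l.length) = occVal l p d1 d2 := by
  intro m
  induction m with
  | zero => intro fuel _ _ h; omega
  | succ m ih =>
    intro fuel hm hf hq hlast
    rcases fuel with _ | f
    · omega
    · have hc : ((m+1 : Nat):Int) - 1 - l.length = (m:Int) - l.length := by omega
      rw [hc]
      rcases Nat.eq_or_lt_of_le (Nat.lt_succ_iff.mp hq) with he | hlt
      · rw [← he]
        exact loopA_succ_some l f p d1 d2 hO
      · have hnom : ¬ EndsAt l m := fun hE => hlast m (by omega) (by omega) hE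
        rw [loopA_succ_none l f m (by omega) hnom]
        have hc2 : (m:Int) - l.length - 1 = (m:Int) - 1 - l.length := by omega
        rw [hc2]
        exact ih f (by omega) (by omega) hlt (fun q' h1 h2 => hlast q' h1 (by omega))

-- B's loop: global characterization
lemma goB_zero (l : List Char) : ∀ (i : Nat) (ans : Int),
    (∀ p, i ≤ p → ¬ ∃ d1 d2, Occ l p d1 d2) →
    framesAltGo l i ans = ans := by
  suffices h : ∀ (k i : Nat) (ans : Int), l.length - i ≤ k →
      (∀ p, i ≤ p → ¬ ∃ d1 d2, Occ l p d1 d2) → framesAltGo l i ans = ans by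
    intro i ans hno
    exact h (l.length - i) i ans le_rfl hno
  intro k
  induction k with
  | zero =>
    intro i ans hk hno
    rw [framesAltGo]
    simp [show ¬ i < l.length from by omega]
  | succ k ih =>
    intro i ans hk hno
    rw [framesAltGo]
    by_cases hi : i < l.length
    · simp only [hi, dif_pos]
      have hinner : (if l[i] = '[' then
          match framesAltValueAt l i with
          | some v => v
          | none => ans
         else ans) = ans := by
        by_cases hbr : l[i] = '['
        · rw [if_pos hbr]
          rcases hv : framesAltValueAt l i with _ | v
          · rfl
          · exfalso
            obtain ⟨d1, d2, hT, _⟩ := valueAt_inv l i v hv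
            exact hno i le_rfl ⟨d1, d2, by rw [List.getElem?_eq_getElem hi, hbr], hT⟩
        · rw [if_neg hbr]
      rw [hinner]
      exact ih (i+1) ans (by omega) (fun p hp => hno p (by omega))
    · simp [hi]

lemma goB_find (l : List Char) (p d1 d2 : Nat) (hO : Occ l p d1 d2)
    (hlast : ∀ p', p < p' → ¬ ∃ d1' d2', Occ l p' d1' d2') :
    ∀ (i : Nat) (ans : Int), i ≤ p → framesAltGo l i ans = occVal l p d1 d2 := by
  suffices h : ∀ (k i : Nat) (ans : Int), p - i ≤ k → i ≤ p →
      framesAltGo l i ans = occVal l p d1 d2 by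
    intro i ans hip
    exact h (p - i) i ans le_rfl hip
  have hpn : p < l.length := (List.getElem?_eq_some_iff.mp hO.1).1
  intro k
  induction k with
  | zero =>
    intro i ans hk hip
    have hie : i = p := by omega
    subst hie
    rw [framesAltGo]
    simp only [hpn, dif_pos]
    have hbr : l[i] = '[' := by
      have := hO.1
      rw [List.getElem?_eq_getElem hpn] at this
      exact Option.some_injective _ this
    rw [if_pos hbr, valueAt_some l i d1 d2 hO.2]
    exact goB_zero l (i+1) _ (fun p' hp' => hlast p' (by omega))
  | succ k ih =>
    intro i ans hk hip
    rcases Nat.eq_or_lt_of_le hip with hie | hlt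
    · subst hie
      rw [framesAltGo]
      simp only [hpn, dif_pos]
      have hbr : l[i] = '[' := by
        have := hO.1
        rw [List.getElem?_eq_getElem hpn] at this
        exact Option.some_injective _ this
      rw [if_pos hbr, valueAt_some l i d1 d2 hO.2]
      exact goB_zero l (i+1) _ (fun p' hp' => hlast p' (by omega))
    · rw [framesAltGo]
      simp only [show i < l.length from by omega, dif_pos]
      exact ih (i+1) _ (by omega) (by omega)

-- pattern positions: ends in range, starts ordered iff ends ordered
lemma ends_lt (l : List Char) (q : Nat) (h : EndsAt l q) : q < l.length := by
  obtain ⟨p, d1, d2, ⟨_, _, _, _, _, _, hq⟩, hqe⟩ := h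
  have := (List.getElem?_eq_some_iff.mp hq).1
  omega

lemma occ_lt (l : List Char) (p d1 d2 p' d1' d2' : Nat)
    (h : Occ l p d1 d2) (h' : Occ l p' d1' d2') (hpp : p < p') :
    p+2+d1+d2 < p'+2+d1'+d2' := by
  obtain ⟨hb, h1, h2, hd1, hdash, hd2, hket⟩ := h
  obtain ⟨hb', _⟩ := h'
  have hq : p+2+d1+d2 < p' := by
    by_contra hle
    rw [Nat.not_lt] at hle
    have hcase : (p+1 ≤ p' ∧ p' < p+1+d1) ∨ p' = p+1+d1 ∨
        (p+2+d1 ≤ p' ∧ p' < p+2+d1+d2) ∨ p' = p+2+d1+d2 := by omega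
    rcases hcase with ⟨hA, hB⟩ | hB | ⟨hA, hB⟩ | hB
    · obtain ⟨c, hc, hdc⟩ := hd1 (p' - (p+1)) (by omega)
      rw [show p + 1 + (p' - (p+1)) = p' from by omega, hb'] at hc
      cases hc; simp [PySem.Chars.isdigit] at hdc
    · rw [← hB, hb'] at hdash; simp at hdash
    · obtain ⟨c, hc, hdc⟩ := hd2 (p' - (p+2+d1)) (by omega)
      rw [show p + 2 + d1 + (p' - (p+2+d1)) = p' from by omega, hb'] at hc
      cases hc; simp [PySem.Chars.isdigit] at hdc
    · rw [← hB, hb'] at hket; simp at hket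
  omega

lemma exists_max (P : Nat → Prop) : ∀ (N : Nat), (∀ q, P q → q < N) → (∃ q, P q) →
    ∃ q, P q ∧ ∀ q', P q' → q' ≤ q := by
  intro N
  induction N with
  | zero => intro hb ⟨q, hq⟩; exact absurd (hb q hq) (by omega)
  | succ N ih =>
    intro hb he
    by_cases hN : P N
    · exact ⟨N, hN, fun q' hq' => by have := hb q' hq'; omega⟩
    · refine ih (fun q hq => ?_) he
      have := hb q hq
      rcases Nat.lt_succ_iff_lt_or_eq.mp this with h | h
      · exact h
      · exact absurd (h ▸ hq) hN

-- ===== VERDICT (by name: the statement is the Claim_ definition above) =====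
theorem frames_spec : Claim_equal_frames := by
  intro s _hd
  unfold Spec_frames frames frames_alt
  set l := s.toList with hl
  have hstart : (-1 : Int) = (l.length : Int) - 1 - l.length := by omega
  rw [hstart]
  by_cases hex : ∃ p d1 d2, Occ l p d1 d2
  · obtain ⟨p0, d10, d20, hO0⟩ := hex
    obtain ⟨q, hq, hqmax⟩ := exists_max (EndsAt l) l.length (fun q h => ends_lt l q h)
      ⟨p0+2+d10+d20, p0, d10, d20, hO0, rfl⟩
    obtain ⟨p, d1, d2, hO, hqe⟩ := hq
    have hA : framesLoop l (l.length + 1) ((l.length:Int) - 1 - l.length) = occVal l p d1 d2 := by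
      apply loopA_find l p d1 d2 hO l.length (l.length+1) le_rfl le_rfl
      · have := ends_lt l q ⟨p, d1, d2, hO, hqe⟩; omega
      · intro q' h1 h2 hE
        have := hqmax q' hE; omega
    have hB : framesAltGo l 0 0 = occVal l p d1 d2 := by
      apply goB_find l p d1 d2 hO _ 0 0 (Nat.zero_le p)
      intro p' hpp ⟨d1', d2', hO'⟩
      have hlt := occ_lt l p d1 d2 p' d1' d2' hO hO' hpp
      have := hqmax (p'+2+d1'+d2') ⟨p', d1', d2', hO', rfl⟩
      omega
    rw [hA, hB]
  · have hA : framesLoop l (l.length + 1) ((l.length:Int) - 1 - l.length) = 0 := by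
      apply loopA_zero l l.length (l.length+1) le_rfl le_rfl
      intro q _ ⟨p, d1, d2, hO, _⟩
      exact hex ⟨p, d1, d2, hO⟩
    have hB : framesAltGo l 0 0 = 0 := by
      apply goB_zero
      intro p _ ⟨d1, d2, hO⟩
      exact hex ⟨p, d1, d2, hO⟩
    rw [hA, hB]
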